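-- pv_equiv track=rewrite | github.com/MatejPulec/car4_autonomous | car4_ws/src/local_planner/src/local_driver.py | local_minima_with_radius
-- ===== SOURCE A (Python) =====
-- def local_minima_with_radius(arr, r):
--     arr = list(arr)
--     n = len(arr)
--     result = [4] * n  # Initialize result with zeros
--
--     for i in range(n):
--         # Define the start and end indices to check within radius r
--         start = max(0, i - r)
--         end = min(n, i + r + 1)
--
--         # Exclude the current element and check if it's the smallest in the neighborhood
--
--         if arr[i] <= min(arr[start:i], default=float('inf')) and arr[i] < min(arr[i+1:end], default=float('inf')):
--             result[i] = arr[i]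
--
--     return result
-- ===== SOURCE B (Python) =====
-- def local_minima_with_radius(arr, r):
--     # O(n) sliding-window minima via monotonic deques (a list plus a head index),
--     # instead of A's per-index O(r) slice scans.
--     a = list(arr)
--     n = len(a)
--
--     # left_min[i] = min(a[max(0, i - r):i]) or None if that window is empty.
--     left_min = [None] * n
--     dq, h = [], 0  # live deque is dq[h:]; indices increase, values strictly increase
--     for i in range(n):
--         # evict indices that fell out of the window [i - r, i)
--         while h < len(dq) and dq[h] < i - r:
--             h += 1
--         left_min[i] = a[dq[h]] if h < len(dq) else None
--         # push i for future windows, keeping values strictly increasing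
--         while h < len(dq) and a[i] <= a[dq[-1]]:
--             dq.pop()
--         dq.append(i)
--
--     # right_min[i] = min(a[i + 1:min(n, i + r + 1)]) or None if empty.
--     right_min = [None] * n
--     dq, h = [], 0  # live deque is dq[h:]; indices decrease, values strictly increase
--     for i in range(n - 1, -1, -1):
--         if i + 1 < n:
--             j = i + 1
--             while h < len(dq) and a[j] <= a[dq[-1]]:
--                 dq.pop()
--             dq.append(j)
--         while h < len(dq) and dq[h] > i + r:
--             h += 1
--         right_min[i] = a[dq[h]] if h < len(dq) else None
--
--     return [
--         a[i]
--         if (left_min[i] is None or a[i] <= left_min[i])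
--         and (right_min[i] is None or a[i] < right_min[i])
--         else 4
--         for i in range(n)
--     ]
-- ===== Notes on version B (the rewrite author's own statement) =====
-- stated objective: faster
-- what changed: Replaces A's per-index O(r) slice-and-min scans with two monotonic-deque sliding-window-minimum passes (left and right neighborhoods), O(n) total.
-- intended difference: For radius r <= -2 (with -r < n), A's slice end min(n, i+r+1) is negative so Python wraps it around, making A compare early elements against a spurious far-right neighborhood and overwrite them with 4; B treats a negative radius as empty neighborhoods and returns arr unchanged, the intended reading of a radius. — e.g. on local_minima_with_radius([1, 1, 1], -2): A returns [4, 1, 1], B returns [1, 1, 1]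
import Mathlib
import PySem

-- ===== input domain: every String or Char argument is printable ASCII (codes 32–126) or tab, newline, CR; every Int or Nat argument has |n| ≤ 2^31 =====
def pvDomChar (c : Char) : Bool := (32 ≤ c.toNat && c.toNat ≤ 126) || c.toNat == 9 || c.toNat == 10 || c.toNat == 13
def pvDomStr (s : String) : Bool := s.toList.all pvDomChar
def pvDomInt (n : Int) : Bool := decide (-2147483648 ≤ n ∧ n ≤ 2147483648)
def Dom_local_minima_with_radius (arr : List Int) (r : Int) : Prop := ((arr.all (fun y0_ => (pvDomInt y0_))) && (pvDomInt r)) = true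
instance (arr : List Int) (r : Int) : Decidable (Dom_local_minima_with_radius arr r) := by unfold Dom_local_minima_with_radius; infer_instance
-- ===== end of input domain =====

-- B replaces A's per-index O(r) slice scans with two O(n) monotonic-deque sliding-window-minimum passes.

-- ===== PORT A =====
-- literal transliteration of A: result = [4]*n, then per index a min over the two
-- neighborhood slices (min(..., default=inf) ported as Option: none = empty slice = inf).
def local_minima_with_radius (arr : List Int) (r : Int) : List Int :=
  let n := arr.length
  (List.range n).foldl
    (fun (result : List Int) (i : Nat) =>
      let start : Int := max 0 ((i : Int) - r)
      let stop : Int := min (n : Int) ((i : Int) + r + 1)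
      let x : Int := arr.getD i 0        -- arr[i], i < n so exact
      let condL : Bool :=
        match PySem.List.min? (PySem.List.slice arr (some start) (some (i : Int))) (fun y => y) with
        | none => true                   -- empty slice: min defaults to inf, comparison true
        | some m => decide (x ≤ m)
      let condR : Bool :=
        match PySem.List.min? (PySem.List.slice arr (some ((i : Int) + 1)) (some stop)) (fun y => y) with
        | none => true
        | some m => decide (x < m)
      if condL && condR then result.set i x else result)
    (List.replicate n 4)

-- ===== PORT B =====
-- Source B keeps each deque as a python list plus a head index; here the live segment dq[h:]
-- is the List itself: `while dq and p(dq[-1]): dq.pop()` is popBackWhile, advancing the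
-- head index is dropWhile, appending is ++ [i].
def popBackWhile (p : Nat → Bool) : List Nat → List Nat
  | [] => []
  | x :: xs =>
    match popBackWhile p xs with
    | [] => if p x then [] else [x]
    | y :: ys => x :: y :: ys

-- one iteration of Source B's left-pass loop body (evict, read left_min[i], push i)
def lmStep (a : Nat → Int) (r : Int) (st : List Nat × List (Option Int)) (i : Nat) :
    List Nat × List (Option Int) :=
  let dq := st.1.dropWhile (fun (j : Nat) => decide ((j : Int) < (i : Int) - r))
  (popBackWhile (fun (j : Nat) => decide (a i ≤ a j)) dq ++ [i], st.2 ++ [dq.head?.map a])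

-- one iteration of Source B's right-pass loop body (push i+1 if any, evict, read right_min[i])
def rmStep (a : Nat → Int) (r : Int) (n : Nat) (st : List Nat × List (Option Int)) (i : Nat) :
    List Nat × List (Option Int) :=
  let dq := if i + 1 < n then popBackWhile (fun (j : Nat) => decide (a (i + 1) ≤ a j)) st.1 ++ [i + 1] else st.1
  let dq2 := dq.dropWhile (fun (j : Nat) => decide ((i : Int) + r < (j : Int)))
  (dq2, dq2.head?.map a :: st.2)

def local_minima_with_radius_alt (arr : List Int) (r : Int) : List Int :=
  let n := arr.length
  let a : Nat → Int := fun j => arr.getD j 0   -- a[j], indices used are in range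
  let lmins := ((List.range n).foldl (lmStep a r) ([], [])).2
  -- for i in range(n-1, -1, -1), right_min[i] assigned while i descends
  let rmins := ((List.range n).reverse.foldl (rmStep a r n) ([], [])).2
  (List.range n).map (fun i =>
    let cl : Bool :=
      match lmins.getD i none with
      | none => true
      | some m => decide (a i ≤ m)
    let cr : Bool :=
      match rmins.getD i none with
      | none => true
      | some m => decide (a i < m)
    if cl && cr then a i else 4)

-- ===== PRECONDITION & SPEC =====
-- For radius r ≤ -2 (with -r < n), A's slice end min(n, i+r+1) is negative so Python wraps it
-- around, making A compare early elements against a spurious far-right neighborhood and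
-- overwrite them with 4; B treats a negative radius as empty neighborhoods and returns arr
-- unchanged, the intended reading of a radius.
def D_local_minima_with_radius (arr : List Int) (r : Int) : Prop :=
  ∃ i < arr.length, (i : Int) + r + 1 < 0 ∧ arr.getD i 0 ≠ 4 ∧
    ∃ j < arr.length, i < j ∧ (j : Int) < (arr.length : Int) + (i : Int) + r + 1 ∧
      arr.getD j 0 ≤ arr.getD i 0
instance (arr : List Int) (r : Int) : Decidable (D_local_minima_with_radius arr r) := by
  unfold D_local_minima_with_radius; infer_instance

def Spec_local_minima_with_radius (arr : List Int) (r : Int) (out : List Int) : Prop :=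
  ¬ D_local_minima_with_radius arr r → out = local_minima_with_radius_alt arr r
instance (arr : List Int) (r : Int) (out : List Int) : Decidable (Spec_local_minima_with_radius arr r out) := by
  unfold Spec_local_minima_with_radius; infer_instance

def pvDiffWitness_local_minima_with_radius : List Int × Int := ([1, 1, 1], -2)
def pvDiffWitnessOut_local_minima_with_radius : (List Int) × (List Int) := ([4, 1, 1], [1, 1, 1])

-- ===== CLAIM (what is proved, stated in full; the proofs are below) =====
def Claim_unchanged_local_minima_with_radius : Prop := ∀ (arr : List Int) (r : Int), Dom_local_minima_with_radius arr r → Spec_local_minima_with_radius arr r (local_minima_with_radius arr r)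
def Claim_changed_local_minima_with_radius : Prop := Dom_local_minima_with_radius (pvDiffWitness_local_minima_with_radius.1) (pvDiffWitness_local_minima_with_radius.2) ∧ D_local_minima_with_radius (pvDiffWitness_local_minima_with_radius.1) (pvDiffWitness_local_minima_with_radius.2) ∧ local_minima_with_radius (pvDiffWitness_local_minima_with_radius.1) (pvDiffWitness_local_minima_with_radius.2) = pvDiffWitnessOut_local_minima_with_radius.1 ∧ local_minima_with_radius_alt (pvDiffWitness_local_minima_with_radius.1) (pvDiffWitness_local_minima_with_radius.2) = pvDiffWitnessOut_local_minima_with_radius.2 ∧ pvDiffWitnessOut_local_minima_with_radius.1 ≠ pvDiffWitnessOut_local_minima_with_radius.2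
def Claim_exact_local_minima_with_radius : Prop := ∀ (arr : List Int) (r : Int), Dom_local_minima_with_radius arr r → D_local_minima_with_radius arr r → local_minima_with_radius arr r ≠ local_minima_with_radius_alt arr r

-- ===== LEMMAS AND PROOFS =====

-- generic: popping from the back while p holds removes, on a list where p is
-- monotone along the list, exactly the p-elements (they form a suffix)
theorem popBackWhile_eq_filter (p : Nat → Bool) (l : List Nat)
    (h : l.Pairwise (fun x y => p x = true → p y = true)) :
    popBackWhile p l = l.filter (fun x => ! p x) := by
  induction l with
  | nil => rfl
  | cons x xs ih =>
    rw [List.pairwise_cons] at h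
    have ih' := ih h.2
    by_cases hx : p x = true
    · have hall : xs.filter (fun x => ! p x) = [] := by
        rw [List.filter_eq_nil_iff]
        intro y hy
        simp [h.1 y hy hx]
      simp [popBackWhile, ih', hall, hx]
    · cases hfl : xs.filter (fun x => ! p x) with
      | nil => simp [popBackWhile, ih', hfl, hx]
      | cons z zs => simp [popBackWhile, ih', hfl, hx]

-- generic: dropWhile on a list where p is antitone along the list is a filter
theorem dropWhile_eq_filter_pw (p : Nat → Bool) (l : List Nat)
    (h : l.Pairwise (fun x y => p y = true → p x = true)) :
    l.dropWhile p = l.filter (fun x => ! p x) := by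
  induction l with
  | nil => rfl
  | cons x xs ih =>
    rw [List.pairwise_cons] at h
    by_cases hx : p x = true
    · simp [hx, ih h.2]
    · have hxs : xs.filter (fun x => ! p x) = xs := by
        rw [List.filter_eq_self]
        intro y hy
        simp only [Bool.not_eq_true']
        cases hpy : p y
        · rfl
        · exact absurd (h.1 y hy hpy) hx
      simp [hx, hxs]

theorem foldl_set_length (c : Nat → Bool) (v : Nat → Int) (l : List Nat) (init : List Int) :
    (l.foldl (fun res i => if c i then res.set i (v i) else res) init).length = init.length := by
  induction l generalizing init with
  | nil => rfl
  | cons x xs ih =>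
    rw [List.foldl_cons, ih]
    split <;> simp

theorem foldl_set_range_getElem? (c : Nat → Bool) (v : Nat → Int) (m : Nat) (init : List Int) (k : Nat) :
    ((List.range m).foldl (fun res i => if c i then res.set i (v i) else res) init)[k]?
    = if k < m ∧ k < init.length ∧ c k = true then some (v k) else init[k]? := by
  induction m with
  | zero => simp
  | succ m ih =>
    rw [List.range_succ, List.foldl_append, List.foldl_cons, List.foldl_nil]
    by_cases hc : c m
    · rw [hc, if_pos rfl]
      rw [List.getElem?_set]
      by_cases hk : m = k
      · subst hk
        rw [foldl_set_length]
        by_cases hlen : m < init.length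
        · simp [hlen, hc]
        · simp [hlen]
      · simp only [if_neg hk, ih]
        have : (k < m ∧ k < init.length ∧ c k = true) ↔ (k < m + 1 ∧ k < init.length ∧ c k = true) := by
          constructor
          · rintro ⟨h1, h2, h3⟩; exact ⟨by omega, h2, h3⟩
          · rintro ⟨h1, h2, h3⟩; exact ⟨by omega, h2, h3⟩
        rw [if_congr this rfl rfl]
    · rw [if_neg (by simp [hc]), ih]
      have : (k < m ∧ k < init.length ∧ c k = true) ↔ (k < m + 1 ∧ k < init.length ∧ c k = true) := by
        constructor
        · rintro ⟨h1, h2, h3⟩; exact ⟨by omega, h2, h3⟩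
        · rintro ⟨h1, h2, h3⟩
          refine ⟨?_, h2, h3⟩
          rcases Nat.lt_succ_iff_lt_or_eq.1 h1 with h | h
          · exact h
          · subst h; exact absurd h3 (by simpa using hc)
      rw [if_congr this rfl rfl]


-- A written pointwise: its per-index condition
def cA (arr : List Int) (r : Int) (i : Nat) : Bool :=
  (match PySem.List.min? (PySem.List.slice arr (some (max 0 ((i : Int) - r))) (some (i : Int))) (fun y => y) with
   | none => true
   | some m => decide (arr.getD i 0 ≤ m))
  &&
  (match PySem.List.min? (PySem.List.slice arr (some ((i : Int) + 1)) (some (min (arr.length : Int) ((i : Int) + r + 1)))) (fun y => y) with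
   | none => true
   | some m => decide (arr.getD i 0 < m))

theorem A_map (arr : List Int) (r : Int) :
    local_minima_with_radius arr r
      = (List.range arr.length).map (fun i => if cA arr r i then arr.getD i 0 else 4) := by
  unfold local_minima_with_radius
  change (List.range arr.length).foldl
      (fun (result : List Int) (i : Nat) =>
        if cA arr r i then result.set i (arr.getD i 0) else result)
      (List.replicate arr.length 4) = _
  apply List.ext_getElem?
  intro k
  rw [foldl_set_range_getElem? (c := fun i => cA arr r i) (v := fun i => arr.getD i 0)]
  by_cases hk : k < arr.length
  · have hrep : k < (List.replicate arr.length (4 : Int)).length := by simpa using hk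
    rw [List.getElem?_map, List.getElem?_range hk, List.getElem?_eq_getElem hrep]
    simp only [List.getElem_replicate, List.length_replicate]
    by_cases hc : cA arr r k
    · simp [hk, hc]
    · simp [hk, hc]
  · rw [if_neg (by simp; omega)]
    rw [List.getElem?_eq_none (by simpa using hk), List.getElem?_eq_none (by simpa using hk)]

-- min(l, default=inf) compared with x, as a universally quantified condition
theorem minCond (l : List Int) (x : Int) (cb : Int → Int → Bool)
    (hmono : ∀ u v w : Int, cb u v = true → v ≤ w → cb u w = true) :
    (match PySem.List.min? l (fun y => y) with
     | none => true
     | some m => cb x m) = decide (∀ y ∈ l, cb x y = true) := by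
  cases h : PySem.List.min? l (fun y => y) with
  | none =>
    have : l = [] := (PySem.List.min?_eq_none_iff l (fun y => y)).1 h
    subst this; simp
  | some m =>
    have hm : m ∈ l := PySem.List.min?_mem h
    have hmin : ∀ y ∈ l, m ≤ y := PySem.List.min?_isMin h
    cases hcb : cb x m with
    | true =>
      have : ∀ y ∈ l, cb x y = true := fun y hy => hmono x m y hcb (hmin y hy)
      simp [hcb]
      exact this
    | false =>
      have : ¬ (∀ y ∈ l, cb x y = true) := fun hall => by rw [hall m hm] at hcb; cases hcb
      simp [this, hcb]

theorem mem_drop_take (arr : List Int) (s t : Nat) (ht : t ≤ arr.length) (y : Int) :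
    y ∈ (arr.drop s).take (t - s) ↔ ∃ j : Nat, s ≤ j ∧ j < t ∧ y = arr.getD j 0 := by
  constructor
  · intro hy
    obtain ⟨p, hp, he⟩ := List.getElem_of_mem hy
    have hp' : p < t - s ∧ p < arr.length - s := by
      have := hp
      simp [List.length_take, List.length_drop] at this
      omega
    refine ⟨s + p, by omega, by omega, ?_⟩
    rw [List.getElem_take, List.getElem_drop] at he
    rw [List.getD_eq_getElem arr 0 (by omega), ← he]
  · rintro ⟨j, hsj, hjt, hy⟩
    have hj : j < arr.length := by omega
    rw [List.getD_eq_getElem arr 0 hj] at hy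
    rw [List.mem_iff_getElem]
    refine ⟨j - s, ?_, ?_⟩
    · simp [List.length_take, List.length_drop]; omega
    · rw [List.getElem_take, List.getElem_drop]
      rw [hy]
      congr 1
      omega

theorem map_getD_range (arr : List Int) :
    (List.range arr.length).map (fun i => arr.getD i 0) = arr := by
  apply List.ext_getElem (by simp)
  intro k h1 h2
  simp [List.getElem?_eq_getElem h2]


-- ---------- left pass: reference recursion and monotonic-deque invariant ----------

-- "j survives all later pushes up to i": the suffix-minimum property
def spL (a : Nat → Int) (i j : Nat) : Bool := decide (∀ k, k < i → j < k → a j < a k)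
-- members of the left deque at the START of step i (before step i's eviction)
def fL (a : Nat → Int) (r : Int) (i j : Nat) : Bool :=
  decide ((i : Int) - 1 - r ≤ (j : Int)) && spL a i j
-- members after step i's eviction (the window [i-r, i))
def gL (a : Nat → Int) (r : Int) (i j : Nat) : Bool :=
  decide ((i : Int) - r ≤ (j : Int)) && spL a i j

def evL (r : Int) (i : Nat) (dq : List Nat) : List Nat :=
  dq.dropWhile (fun (j : Nat) => decide ((j : Int) < (i : Int) - r))

def dqL (a : Nat → Int) (r : Int) : Nat → List Nat
  | 0 => []
  | i + 1 => popBackWhile (fun (j : Nat) => decide (a i ≤ a j)) (evL r i (dqL a r i)) ++ [i]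

def lmVal (a : Nat → Int) (r : Int) (i : Nat) : Option Int := ((evL r i (dqL a r i)).head?).map a

theorem lm_fold (a : Nat → Int) (r : Int) (m : Nat) :
    (List.range m).foldl (lmStep a r) ([], []) = (dqL a r m, (List.range m).map (lmVal a r)) := by
  induction m with
  | zero => rfl
  | succ m ih =>
    rw [List.range_succ, List.foldl_append, ih, List.foldl_cons, List.foldl_nil, List.map_append]
    rfl

theorem evL_step (a : Nat → Int) (r : Int) (i : Nat)
    (h : dqL a r i = (List.range i).filter (fL a r i)) :
    evL r i (dqL a r i) = (List.range i).filter (gL a r i) := by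
  unfold evL
  rw [h]
  have hpw : ((List.range i).filter (fL a r i)).Pairwise
      (fun (x y : Nat) => (decide ((y : Int) < (i : Int) - r)) = true → (decide ((x : Int) < (i : Int) - r)) = true) := by
    have h1 : ((List.range i).filter (fL a r i)).Pairwise (· < ·) :=
      (List.Pairwise.sublist List.filter_sublist List.pairwise_lt_range)
    exact h1.imp (by intro x y hxy; simp only [decide_eq_true_eq]; intro hy; omega)
  rw [dropWhile_eq_filter_pw _ _ hpw, List.filter_filter]
  refine List.filter_congr ?_
  intro j hj
  cases hs : spL a i j with
  | false => simp [fL, gL, hs]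
  | true =>
    rw [Bool.eq_iff_iff]
    simp only [fL, gL, hs, Bool.and_true, Bool.and_eq_true, Bool.not_eq_true',
      decide_eq_true_eq, decide_eq_false_iff_not, not_lt]
    omega

theorem dqL_eq_filter (a : Nat → Int) (r : Int) (hr : 0 ≤ r) (i : Nat) :
    dqL a r i = (List.range i).filter (fL a r i) := by
  induction i with
  | zero => rfl
  | succ i ih =>
    show popBackWhile (fun (j : Nat) => decide (a i ≤ a j)) (evL r i (dqL a r i)) ++ [i] = _
    rw [evL_step a r i ih]
    have hpw : ((List.range i).filter (gL a r i)).Pairwise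
        (fun (x y : Nat) => (decide (a i ≤ a x)) = true → (decide (a i ≤ a y)) = true) := by
      have h1 : ((List.range i).filter (gL a r i)).Pairwise (· < ·) :=
        (List.Pairwise.sublist List.filter_sublist List.pairwise_lt_range)
      refine h1.imp_of_mem ?_
      intro x y hx hy hxy
      have hgx : gL a r i x = true := List.of_mem_filter hx
      have hyr : y < i := List.mem_range.1 (List.mem_of_mem_filter hy)
      have hsx : ∀ k, k < i → x < k → a x < a k := by
        simp only [gL, spL, Bool.and_eq_true, decide_eq_true_eq] at hgx
        exact hgx.2
      have hxy' : a x < a y := hsx y hyr hxy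
      simp only [decide_eq_true_eq]
      intro h; exact le_trans h (le_of_lt hxy')
    rw [popBackWhile_eq_filter _ _ hpw, List.filter_filter]
    rw [List.range_succ, List.filter_append]
    have hi : fL a r (i + 1) i = true := by
      simp only [fL, spL, Bool.and_eq_true, decide_eq_true_eq]
      constructor
      · push_cast; omega
      · intro k hk1 hk2; omega
    have hsingle : [i].filter (fL a r (i + 1)) = [i] := by simp [hi]
    rw [hsingle]
    congr 1
    refine List.filter_congr ?_
    intro j hj
    have hji : j < i := List.mem_range.1 hj
    rw [Bool.eq_iff_iff]
    simp only [fL, gL, spL, Bool.and_eq_true, Bool.not_eq_true', decide_eq_true_eq,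
      decide_eq_false_iff_not, not_le]
    constructor
    · intro h
      obtain ⟨h3, h1, h2⟩ := h
      refine ⟨by omega, ?_⟩
      intro k hk1 hk2
      rcases Nat.lt_succ_iff_lt_or_eq.1 hk1 with h | h
      · exact h2 k h hk2
      · subst h; exact h3
    · intro h
      obtain ⟨h1, h2⟩ := h
      refine ⟨h2 i (by omega) hji, by omega, ?_⟩
      intro k hk1 hk2
      exact h2 k (by omega) hk2

theorem exists_spL (a : Nat → Int) (i : Nat) :
    ∀ (d j : Nat), j < i → i - j ≤ d → ∃ m, j ≤ m ∧ m < i ∧ ∀ k, k < i → m < k → a m < a k := by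
  intro d
  induction d with
  | zero => intro j hj hle; omega
  | succ d ihd =>
    intro j hj hle
    by_cases hs : ∀ k, k < i → j < k → a j < a k
    · exact ⟨j, le_refl j, hj, hs⟩
    · push Not at hs
      obtain ⟨k, hk1, hk2, _⟩ := hs
      obtain ⟨m, h1, h2, h3⟩ := ihd k hk1 (by omega)
      exact ⟨m, by omega, h2, h3⟩

theorem headChar_L (a : Nat → Int) (r : Int) (hr : 0 ≤ r) (i : Nat) (x : Int)
    (cb : Int → Int → Bool) (hmono : ∀ u v w : Int, cb u v = true → v ≤ w → cb u w = true) :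
    (match lmVal a r i with | none => true | some m => cb x m)
      = decide (∀ j : Nat, j < i → (i : Int) - r ≤ (j : Int) → cb x (a j) = true) := by
  unfold lmVal
  rw [evL_step a r i (dqL_eq_filter a r hr i)]
  cases hh : ((List.range i).filter (gL a r i)).head? with
  | none =>
    have hnil : (List.range i).filter (gL a r i) = [] := List.head?_eq_none_iff.1 hh
    have hvac : ∀ j : Nat, j < i → (i : Int) - r ≤ (j : Int) → cb x (a j) = true := by
      intro j hj2 hj1
      exfalso
      obtain ⟨m, hm1, hm2, hm3⟩ := exists_spL a i (i - j) j hj2 (le_refl _)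
      have hmem : m ∈ (List.range i).filter (gL a r i) := by
        refine List.mem_filter.2 ⟨List.mem_range.2 hm2, ?_⟩
        simp only [gL, spL, Bool.and_eq_true, decide_eq_true_eq]
        exact ⟨by omega, hm3⟩
      rw [hnil] at hmem
      exact absurd hmem (List.not_mem_nil)
    show (true : Bool) = _
    simp only [Bool.true_eq, decide_eq_true_eq]
    intro j hj hw
    exact hvac j hj (by omega)
  | some j0 =>
    have hj0mem : j0 ∈ (List.range i).filter (gL a r i) := List.mem_of_mem_head? (by rw [hh]; rfl)
    have hj0g : gL a r i j0 = true := List.of_mem_filter hj0mem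
    have hj0i : j0 < i := List.mem_range.1 (List.mem_of_mem_filter hj0mem)
    have hj0g' : ((i : Int) - r ≤ (j0 : Int)) ∧ ∀ k, k < i → j0 < k → a j0 < a k := by
      simp only [gL, spL, Bool.and_eq_true, decide_eq_true_eq] at hj0g
      exact hj0g
    have hj0w : (i : Int) - r ≤ (j0 : Int) := hj0g'.1
    have hj0sp : ∀ k, k < i → j0 < k → a j0 < a k := hj0g'.2
    have hleast : ∀ y ∈ (List.range i).filter (gL a r i), j0 ≤ y := by
      obtain ⟨t, ht⟩ : ∃ t, (List.range i).filter (gL a r i) = j0 :: t := by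
        cases hc : (List.range i).filter (gL a r i) with
        | nil => rw [hc] at hh; cases hh
        | cons z zs => rw [hc] at hh; cases hh; exact ⟨zs, rfl⟩
      have hpw : ((List.range i).filter (gL a r i)).Pairwise (· < ·) :=
        (List.Pairwise.sublist List.filter_sublist List.pairwise_lt_range)
      rw [ht] at hpw ⊢
      intro y hy
      rcases List.mem_cons.1 hy with h | h
      · omega
      · exact le_of_lt (List.rel_of_pairwise_cons hpw h)
    simp only [Option.map_some]
    show cb x (a j0) = _
    cases hcb : cb x (a j0) with
    | true =>
      have hall : ∀ j : Nat, j < i → (i : Int) - r ≤ (j : Int) → cb x (a j) = true := by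
        have H : ∀ (d j : Nat), (i : Int) - r ≤ (j : Int) → j < i → i - j ≤ d → cb x (a j) = true := by
          intro d
          induction d with
          | zero => intro j _ hj hle; omega
          | succ d ihd =>
            intro j hjw hji hle
            by_cases hs : ∀ k, k < i → j < k → a j < a k
            · have hjmem : j ∈ (List.range i).filter (gL a r i) := by
                refine List.mem_filter.2 ⟨List.mem_range.2 hji, ?_⟩
                simp only [gL, spL, Bool.and_eq_true, decide_eq_true_eq]
                exact ⟨hjw, hs⟩
              have hj0le : j0 ≤ j := hleast j hjmem
              rcases Nat.lt_or_ge j0 j with h | h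
              · exact hmono x (a j0) (a j) hcb (le_of_lt (hj0sp j hji h))
              · have : j = j0 := by omega
                subst this; exact hcb
            · push Not at hs
              obtain ⟨k, hk1, hk2, hk3⟩ := hs
              have hck : cb x (a k) = true := ihd k (by omega) hk1 (by omega)
              exact hmono x (a k) (a j) hck hk3
        intro j hji hjw
        exact H (i - j) j hjw hji (le_refl _)
      simp only [Bool.true_eq, decide_eq_true_eq]
      exact hall
    | false =>
      have : ¬ (∀ j : Nat, j < i → (i : Int) - r ≤ (j : Int) → cb x (a j) = true) := by
        intro hall
        rw [hall j0 hj0i hj0w] at hcb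
        cases hcb
      simp only [Bool.false_eq, decide_eq_false_iff_not]
      exact this


-- ---------- right pass: reference recursion and monotonic-deque invariant ----------

-- "j is strictly smaller than everything processed after it (indices in (i0, j))"
def spR (a : Nat → Int) (i0 j : Nat) : Bool := decide (∀ k, k < j → i0 < k → a j < a k)
-- members of the right deque after processing down to step i0 (eviction included)
def gR (a : Nat → Int) (r : Int) (i0 j : Nat) : Bool :=
  decide (i0 < j) && decide ((j : Int) ≤ (i0 : Int) + r) && spR a i0 j

def evR (r : Int) (i : Nat) (dq : List Nat) : List Nat :=
  dq.dropWhile (fun (j : Nat) => decide ((i : Int) + r < (j : Int)))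

def dqRi (a : Nat → Int) (r : Int) (n : Nat) (i : Nat) : List Nat :=
  if _h : n ≤ i then []
  else
    evR r i
      (if i + 1 < n then
        popBackWhile (fun (j : Nat) => decide (a (i + 1) ≤ a j)) (dqRi a r n (i + 1)) ++ [i + 1]
       else dqRi a r n (i + 1))
termination_by n - i
decreasing_by all_goals omega

def rmVal (a : Nat → Int) (r : Int) (n : Nat) (i : Nat) : Option Int :=
  ((dqRi a r n i).head?).map a

theorem dqRi_base (a : Nat → Int) (r : Int) (n : Nat) : dqRi a r n n = [] := by
  unfold dqRi; simp

theorem rm_fold_aux (a : Nat → Int) (r : Int) (n : Nat) :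
    ∀ (d k : Nat), k ≤ n → n - k ≤ d →
      (List.range n).reverse.foldl (rmStep a r n) ([], [])
        = (List.range k).reverse.foldl (rmStep a r n)
            (dqRi a r n k, (List.range' k (n - k)).map (rmVal a r n)) := by
  intro d
  induction d with
  | zero =>
    intro k hk hd
    have hkn : k = n := by omega
    subst hkn
    rw [Nat.sub_self, dqRi_base]
    rfl
  | succ d ihd =>
    intro k hk hd
    by_cases hkn : k = n
    · subst hkn; rw [Nat.sub_self, dqRi_base]; rfl
    · have hklt : k < n := by omega
      rw [ihd (k + 1) (by omega) (by omega)]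
      rw [List.range_succ, List.reverse_append, List.reverse_singleton, List.singleton_append,
        List.foldl_cons]
      have hdq : (if k + 1 < n then
            popBackWhile (fun (j : Nat) => decide (a (k + 1) ≤ a j)) (dqRi a r n (k + 1)) ++ [k + 1]
          else dqRi a r n (k + 1)).dropWhile (fun (j : Nat) => decide ((k : Int) + r < (j : Int)))
          = dqRi a r n k := by
        conv_rhs => unfold dqRi
        rw [dif_neg (by omega)]
        rfl
      show (List.range k).reverse.foldl (rmStep a r n) (rmStep a r n _ k) = _
      congr 1
      unfold rmStep
      dsimp only
      rw [hdq]
      rw [show n - k = (n - k - 1) + 1 from by omega, List.range'_succ, List.map_cons]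
      rfl

theorem rm_fold (a : Nat → Int) (r : Int) (n : Nat) :
    (List.range n).reverse.foldl (rmStep a r n) ([], [])
      = (dqRi a r n 0, (List.range n).map (rmVal a r n)) := by
  have := rm_fold_aux a r n n 0 (Nat.zero_le n) (le_refl _)
  simpa [List.range_eq_range'] using this

-- j0 smaller than every c-element: consing it is filtering it in
theorem cons_filter_range (n j0 : Nat) (c : Nat → Bool) (hj0 : j0 < n)
    (hc : ∀ j, c j = true → j0 < j) :
    j0 :: (List.range n).filter c
      = (List.range n).filter (fun j => decide (j = j0) || c j) := by
  induction n with
  | zero => omega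
  | succ n ih =>
    rw [List.range_succ, List.filter_append, List.filter_append]
    by_cases h : j0 = n
    · subst h
      have h1 : (List.range j0).filter c = [] := by
        rw [List.filter_eq_nil_iff]
        intro j hj hcj
        exact absurd (hc j hcj) (by have := List.mem_range.1 hj; omega)
      have h2 : (List.range j0).filter (fun j => decide (j = j0) || c j) = [] := by
        rw [List.filter_eq_nil_iff]
        intro j hj hcj
        have hj' := List.mem_range.1 hj
        simp only [Bool.or_eq_true, decide_eq_true_eq] at hcj
        rcases hcj with h | h
        · omega
        · exact absurd (hc j h) (by omega)
      have h3 : c j0 = false := by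
        cases hcj : c j0
        · rfl
        · exact absurd (hc j0 hcj) (by omega)
      simp [h1, h2, h3]
    · have hj0n : j0 < n := by omega
      rw [← ih hj0n]
      have h4 : (decide (n = j0) || c n) = c n := by
        have hne : decide (n = j0) = false := by
          simp only [decide_eq_false_iff_not]; omega
        rw [hne, Bool.false_or]
      simp only [List.filter_singleton, h4, List.cons_append]

theorem dqRi_eq_filter (a : Nat → Int) (r : Int) (n : Nat) (_hr : 0 ≤ r) :
    ∀ (d i : Nat), i ≤ n → n - i ≤ d →
      dqRi a r n i = ((List.range n).filter (gR a r i)).reverse := by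
  intro d
  induction d with
  | zero =>
    intro i hi hd
    have hin : i = n := by omega
    rw [hin, dqRi_base]
    have : (List.range n).filter (gR a r n) = [] := by
      rw [List.filter_eq_nil_iff]
      intro j hj hg
      simp only [gR, spR, Bool.and_eq_true, decide_eq_true_eq] at hg
      exact absurd hg.1.1 (by have := List.mem_range.1 hj; omega)
    rw [this]; rfl
  | succ d ihd =>
    intro i hi hd
    by_cases hin : i = n
    · rw [hin, dqRi_base]
      have : (List.range n).filter (gR a r n) = [] := by
        rw [List.filter_eq_nil_iff]
        intro j hj hg
        simp only [gR, spR, Bool.and_eq_true, decide_eq_true_eq] at hg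
        exact absurd hg.1.1 (by have := List.mem_range.1 hj; omega)
      rw [this]; rfl
    · have hilt : i < n := by omega
      have ih1 : dqRi a r n (i + 1) = ((List.range n).filter (gR a r (i + 1))).reverse :=
        ihd (i + 1) (by omega) (by omega)
      unfold dqRi
      rw [dif_neg (by omega)]
      by_cases hi1 : i + 1 < n
      · rw [if_pos hi1, ih1]
        -- pop the back while a (i+1) ≤ value
        have hpw : (((List.range n).filter (gR a r (i + 1))).reverse).Pairwise
            (fun (x y : Nat) => (decide (a (i + 1) ≤ a x)) = true → (decide (a (i + 1) ≤ a y)) = true) := by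
          have h1 : (((List.range n).filter (gR a r (i + 1))).reverse).Pairwise (fun (x y : Nat) => y < x) :=
            List.pairwise_reverse.2 (List.Pairwise.sublist List.filter_sublist List.pairwise_lt_range)
          refine h1.imp_of_mem ?_
          intro x y hx hy hyx
          have hgx : gR a r (i + 1) x = true :=
            List.of_mem_filter (List.mem_reverse.1 hx)
          have hgy : gR a r (i + 1) y = true :=
            List.of_mem_filter (List.mem_reverse.1 hy)
          simp only [gR, spR, Bool.and_eq_true, decide_eq_true_eq] at hgx hgy
          have hxy : a x < a y := hgx.2 y hyx hgy.1.1
          simp only [decide_eq_true_eq]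
          intro h; exact le_trans h (le_of_lt hxy)
        rw [popBackWhile_eq_filter _ _ hpw, List.filter_reverse]
        rw [← List.reverse_cons]
        rw [List.filter_filter]
        rw [cons_filter_range n (i + 1)
            (fun j => (!decide (a (i + 1) ≤ a j)) && gR a r (i + 1) j) hi1
            (by
              intro j hj
              simp only [Bool.and_eq_true] at hj
              have := hj.2
              simp only [gR, spR, Bool.and_eq_true, decide_eq_true_eq] at this
              exact this.1.1)]
        -- evict: the list is descending, the eviction predicate antitone along it
        show evR r i _ = _
        unfold evR
        have hpw2 : (((List.range n).filter
              (fun j => decide (j = i + 1) || ((!decide (a (i + 1) ≤ a j)) && gR a r (i + 1) j))).reverse).Pairwise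
            (fun (x y : Nat) => (decide ((i : Int) + r < (y : Int))) = true → (decide ((i : Int) + r < (x : Int))) = true) := by
          have h1 : (((List.range n).filter
              (fun j => decide (j = i + 1) || ((!decide (a (i + 1) ≤ a j)) && gR a r (i + 1) j))).reverse).Pairwise
              (fun (x y : Nat) => y < x) :=
            List.pairwise_reverse.2 (List.Pairwise.sublist List.filter_sublist List.pairwise_lt_range)
          refine h1.imp ?_
          intro x y hyx
          simp only [decide_eq_true_eq]
          intro h; omega
        rw [dropWhile_eq_filter_pw _ _ hpw2, List.filter_reverse, List.filter_filter]
        congr 1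
        refine List.filter_congr ?_
        intro j hj
        have hjn : j < n := List.mem_range.1 hj
        rw [Bool.eq_iff_iff]
        simp only [gR, spR, Bool.and_eq_true, Bool.or_eq_true, Bool.not_eq_true',
          decide_eq_true_eq, decide_eq_false_iff_not, not_le]
        constructor
        · rintro ⟨hev, hcase⟩
          rcases hcase with hj1 | ⟨hlt, ⟨hgt, hle⟩, hsp⟩
          · subst hj1
            refine ⟨⟨by omega, by omega⟩, ?_⟩
            intro k hk1 hk2; omega
          · refine ⟨⟨by omega, by omega⟩, ?_⟩
            intro k hk1 hk2
            by_cases hk : k = i + 1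
            · subst hk; exact hlt
            · exact hsp k hk1 (by omega)
        · rintro ⟨⟨hgt, hle⟩, hsp⟩
          refine ⟨by omega, ?_⟩
          by_cases hj1 : j = i + 1
          · exact Or.inl hj1
          · refine Or.inr ⟨hsp (i + 1) (by omega) (by omega), ⟨by omega, by omega⟩, ?_⟩
            intro k hk1 hk2
            exact hsp k hk1 (by omega)
      · -- i + 1 = n : the deque from step i+1 is empty, nothing to push
        have hi1n : i + 1 = n := by omega
        rw [if_neg hi1, ih1]
        have hnil : (List.range n).filter (gR a r (i + 1)) = [] := by
          rw [List.filter_eq_nil_iff]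
          intro j hj hg
          simp only [gR, spR, Bool.and_eq_true, decide_eq_true_eq] at hg
          exact absurd hg.1.1 (by have := List.mem_range.1 hj; omega)
        have hnil2 : (List.range n).filter (gR a r i) = [] := by
          rw [List.filter_eq_nil_iff]
          intro j hj hg
          simp only [gR, spR, Bool.and_eq_true, decide_eq_true_eq] at hg
          have := List.mem_range.1 hj
          omega
        rw [hnil, hnil2]
        rfl


theorem exists_spR (a : Nat → Int) (i0 : Nat) :
    ∀ (d j : Nat), i0 < j → j - i0 ≤ d → ∃ m, i0 < m ∧ m ≤ j ∧ ∀ k, k < m → i0 < k → a m < a k := by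
  intro d
  induction d with
  | zero => intro j hj hle; omega
  | succ d ihd =>
    intro j hj hle
    by_cases hs : ∀ k, k < j → i0 < k → a j < a k
    · exact ⟨j, hj, le_refl j, hs⟩
    · push Not at hs
      obtain ⟨k, hk1, hk2, _⟩ := hs
      obtain ⟨m, h1, h2, h3⟩ := ihd k hk2 (by omega)
      exact ⟨m, h1, by omega, h3⟩

theorem headChar_R (a : Nat → Int) (r : Int) (n : Nat) (hr : 0 ≤ r) (i : Nat) (hi : i ≤ n) (x : Int)
    (cb : Int → Int → Bool) (hmono : ∀ u v w : Int, cb u v = true → v ≤ w → cb u w = true) :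
    (match rmVal a r n i with | none => true | some m => cb x m)
      = decide (∀ j : Nat, j < n → i < j → (j : Int) ≤ (i : Int) + r → cb x (a j) = true) := by
  unfold rmVal
  rw [dqRi_eq_filter a r n hr (n - i) i hi (le_refl _)]
  cases hh : (((List.range n).filter (gR a r i)).reverse).head? with
  | none =>
    have hnil : ((List.range n).filter (gR a r i)) = [] :=
      List.reverse_eq_nil_iff.1 (List.head?_eq_none_iff.1 hh)
    have hvac : ∀ j : Nat, j < n → i < j → (j : Int) ≤ (i : Int) + r → cb x (a j) = true := by
      intro j hjn hij hjr
      exfalso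
      obtain ⟨m, hm1, hm2, hm3⟩ := exists_spR a i (j - i) j hij (le_refl _)
      have hmem : m ∈ (List.range n).filter (gR a r i) := by
        refine List.mem_filter.2 ⟨List.mem_range.2 (by omega), ?_⟩
        simp only [gR, spR, Bool.and_eq_true, decide_eq_true_eq]
        exact ⟨⟨hm1, by omega⟩, hm3⟩
      rw [hnil] at hmem
      exact absurd hmem (List.not_mem_nil)
    show (true : Bool) = _
    simp only [Bool.true_eq, decide_eq_true_eq]
    exact hvac
  | some m0 =>
    have hm0mem : m0 ∈ (List.range n).filter (gR a r i) :=
      List.mem_reverse.1 (List.mem_of_mem_head? (by rw [hh]; rfl))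
    have hm0g : gR a r i m0 = true := List.of_mem_filter hm0mem
    have hm0n : m0 < n := List.mem_range.1 (List.mem_of_mem_filter hm0mem)
    have hm0g' : (i < m0 ∧ (m0 : Int) ≤ (i : Int) + r) ∧ ∀ k, k < m0 → i < k → a m0 < a k := by
      simp only [gR, spR, Bool.and_eq_true, decide_eq_true_eq] at hm0g
      exact hm0g
    have hgreat : ∀ y ∈ (List.range n).filter (gR a r i), y ≤ m0 := by
      obtain ⟨t, ht⟩ : ∃ t, ((List.range n).filter (gR a r i)).reverse = m0 :: t := by
        cases hc : ((List.range n).filter (gR a r i)).reverse with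
        | nil => rw [hc] at hh; cases hh
        | cons z zs => rw [hc] at hh; cases hh; exact ⟨zs, rfl⟩
      have hpw : (((List.range n).filter (gR a r i)).reverse).Pairwise (fun (x y : Nat) => y < x) :=
        List.pairwise_reverse.2 (List.Pairwise.sublist List.filter_sublist List.pairwise_lt_range)
      intro y hy
      rw [← List.mem_reverse] at hy
      rw [ht] at hpw hy
      rcases List.mem_cons.1 hy with h | h
      · omega
      · exact le_of_lt (List.rel_of_pairwise_cons hpw h)
    simp only [Option.map_some]
    show cb x (a m0) = _
    cases hcb : cb x (a m0) with
    | true =>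
      have hall : ∀ j : Nat, j < n → i < j → (j : Int) ≤ (i : Int) + r → cb x (a j) = true := by
        have H : ∀ (d j : Nat), j < n → i < j → (j : Int) ≤ (i : Int) + r → j - i ≤ d → cb x (a j) = true := by
          intro d
          induction d with
          | zero => intro j hjn hij hjr hle; omega
          | succ d ihd =>
            intro j hjn hij hjr hle
            by_cases hs : ∀ k, k < j → i < k → a j < a k
            · have hjmem : j ∈ (List.range n).filter (gR a r i) := by
                refine List.mem_filter.2 ⟨List.mem_range.2 hjn, ?_⟩
                simp only [gR, spR, Bool.and_eq_true, decide_eq_true_eq]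
                exact ⟨⟨hij, hjr⟩, hs⟩
              have hjle : j ≤ m0 := hgreat j hjmem
              rcases Nat.lt_or_ge j m0 with h | h
              · exact hmono x (a m0) (a j) hcb (le_of_lt (hm0g'.2 j h hij))
              · have hjm : j = m0 := by omega
                rw [hjm]; exact hcb
            · push Not at hs
              obtain ⟨k, hk1, hk2, hk3⟩ := hs
              have hck : cb x (a k) = true := ihd k (by omega) hk2 (by omega) (by omega)
              exact hmono x (a k) (a j) hck hk3
        intro j hjn hij hjr
        exact H (j - i) j hjn hij hjr (le_refl _)
      simp only [Bool.true_eq, decide_eq_true_eq]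
      exact hall
    | false =>
      have hne : ¬ (∀ j : Nat, j < n → i < j → (j : Int) ≤ (i : Int) + r → cb x (a j) = true) := by
        intro hall
        rw [hall m0 hm0n hm0g'.1.1 hm0g'.1.2] at hcb
        cases hcb
      simp only [Bool.false_eq, decide_eq_false_iff_not]
      exact hne


-- ---------- assembling both programs into pointwise form ----------

-- B's per-index condition
def cB (arr : List Int) (r : Int) (i : Nat) : Bool :=
  (match lmVal (fun j => arr.getD j 0) r i with
   | none => true
   | some m => decide (arr.getD i 0 ≤ m)) &&
  (match rmVal (fun j => arr.getD j 0) r arr.length i with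
   | none => true
   | some m => decide (arr.getD i 0 < m))

theorem getD_map_range_opt (f : Nat → Option Int) (n i : Nat) (hi : i < n) :
    ((List.range n).map f).getD i none = f i := by
  rw [List.getD, List.getElem?_map, List.getElem?_range hi]
  rfl

theorem B_map (arr : List Int) (r : Int) :
    local_minima_with_radius_alt arr r
      = (List.range arr.length).map (fun i => if cB arr r i then arr.getD i 0 else 4) := by
  unfold local_minima_with_radius_alt
  dsimp only
  rw [lm_fold, rm_fold]
  refine List.map_congr_left ?_
  intro i hi
  have hi' : i < arr.length := List.mem_range.1 hi
  rw [getD_map_range_opt _ _ _ hi', getD_map_range_opt _ _ _ hi']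
  rfl

theorem minCond_le (l : List Int) (x : Int) :
    (match PySem.List.min? l (fun y => y) with
     | none => true
     | some m => decide (x ≤ m)) = decide (∀ y ∈ l, x ≤ y) := by
  have h := minCond l x (fun u v => decide (u ≤ v))
    (by intro u v w h1 h2; simp only [decide_eq_true_eq] at *; omega)
  have h2 : decide (∀ y ∈ l, (fun u v => decide (u ≤ v)) x y = true) = decide (∀ y ∈ l, x ≤ y) := by
    rw [decide_eq_decide]
    constructor
    · intro hh y hy; simpa using hh y hy
    · intro hh y hy; simp [hh y hy]
  exact h.trans h2

theorem minCond_lt (l : List Int) (x : Int) :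
    (match PySem.List.min? l (fun y => y) with
     | none => true
     | some m => decide (x < m)) = decide (∀ y ∈ l, x < y) := by
  have h := minCond l x (fun u v => decide (u < v))
    (by intro u v w h1 h2; simp only [decide_eq_true_eq] at *; omega)
  have h2 : decide (∀ y ∈ l, (fun u v => decide (u < v)) x y = true) = decide (∀ y ∈ l, x < y) := by
    rw [decide_eq_decide]
    constructor
    · intro hh y hy; simpa using hh y hy
    · intro hh y hy; simp [hh y hy]
  exact h.trans h2

theorem headChar_L_le (a : Nat → Int) (r : Int) (hr : 0 ≤ r) (i : Nat) (x : Int) :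
    (match lmVal a r i with | none => true | some m => decide (x ≤ m))
      = decide (∀ j : Nat, j < i → (i : Int) - r ≤ (j : Int) → x ≤ a j) := by
  have h := headChar_L a r hr i x (fun u v => decide (u ≤ v))
    (by intro u v w h1 h2; simp only [decide_eq_true_eq] at *; omega)
  have h2 : decide (∀ j : Nat, j < i → (i : Int) - r ≤ (j : Int) → (fun u v => decide (u ≤ v)) x (a j) = true)
      = decide (∀ j : Nat, j < i → (i : Int) - r ≤ (j : Int) → x ≤ a j) := by
    rw [decide_eq_decide]
    constructor
    · intro hh j h1 h2; simpa using hh j h1 h2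
    · intro hh j h1 h2; simp [hh j h1 h2]
  exact h.trans h2

theorem headChar_R_lt (a : Nat → Int) (r : Int) (n : Nat) (hr : 0 ≤ r) (i : Nat) (hi : i ≤ n) (x : Int) :
    (match rmVal a r n i with | none => true | some m => decide (x < m))
      = decide (∀ j : Nat, j < n → i < j → (j : Int) ≤ (i : Int) + r → x < a j) := by
  have h := headChar_R a r n hr i hi x (fun u v => decide (u < v))
    (by intro u v w h1 h2; simp only [decide_eq_true_eq] at *; omega)
  have h2 : decide (∀ j : Nat, j < n → i < j → (j : Int) ≤ (i : Int) + r → (fun u v => decide (u < v)) x (a j) = true)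
      = decide (∀ j : Nat, j < n → i < j → (j : Int) ≤ (i : Int) + r → x < a j) := by
    rw [decide_eq_decide]
    constructor
    · intro hh j h1 h2 h3; simpa using hh j h1 h2 h3
    · intro hh j h1 h2 h3; simp [hh j h1 h2 h3]
  exact h.trans h2

theorem cA_eq_cB (arr : List Int) (r : Int) (hr : 0 ≤ r) (i : Nat) (hi : i < arr.length) :
    cA arr r i = cB arr r i := by
  unfold cA cB
  congr 1
  · -- left neighborhoods agree
    rw [minCond_le, headChar_L_le (fun j => arr.getD j 0) r hr i]
    rw [decide_eq_decide]
    have hslice : PySem.List.slice arr (some (max 0 ((i : Int) - r))) (some ((i : Nat) : Int))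
        = (arr.drop (max 0 ((i : Int) - r)).toNat).take (i - (max 0 ((i : Int) - r)).toNat) := by
      rw [PySem.List.slice_of_nonneg arr (le_max_left 0 _) (by omega) (by omega) (by omega)]
      rw [Int.toNat_natCast]
    rw [hslice]
    simp only [mem_drop_take arr _ i (le_of_lt hi)]
    constructor
    · rintro hall j hji hjw
      exact hall (arr.getD j 0) ⟨j, by omega, hji, rfl⟩
    · rintro hall y ⟨j, hsj, hji, rfl⟩
      exact hall j hji (by omega)
  · -- right neighborhoods agree
    rw [minCond_lt, headChar_R_lt (fun j => arr.getD j 0) r arr.length hr i (le_of_lt hi)]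
    rw [decide_eq_decide]
    have hcast : (i : Int) + 1 = ((i + 1 : Nat) : Int) := by push_cast; ring
    have hstopnn : 0 ≤ min (arr.length : Int) ((i : Int) + r + 1) := by omega
    have hslice : PySem.List.slice arr (some ((i : Int) + 1))
          (some (min (arr.length : Int) ((i : Int) + r + 1)))
        = (arr.drop (i + 1)).take ((min (arr.length : Int) ((i : Int) + r + 1)).toNat - (i + 1)) := by
      rw [hcast, PySem.List.slice_of_nonneg arr (by omega) hstopnn (by omega) (by omega)]
      rw [Int.toNat_natCast]
    have ht2 : (min (arr.length : Int) ((i : Int) + r + 1)).toNat ≤ arr.length := by omega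
    rw [hslice]
    simp only [mem_drop_take arr (i + 1) _ ht2]
    constructor
    · rintro hall j hjn hij hjr
      exact hall (arr.getD j 0) ⟨j, by omega, by omega, rfl⟩
    · rintro hall y ⟨j, hsj, hjt, rfl⟩
      exact hall j (by omega) (by omega) (by omega)

theorem main_nonneg (arr : List Int) (r : Int) (hr : 0 ≤ r) :
    local_minima_with_radius arr r = local_minima_with_radius_alt arr r := by
  rw [A_map, B_map]
  refine List.map_congr_left ?_
  intro i hi
  rw [cA_eq_cB arr r hr i (List.mem_range.1 hi)]


-- ---------- negative radius: both neighborhoods are (or should be) empty ----------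

theorem popBackWhile_subset (p : Nat → Bool) (l : List Nat) :
    ∀ x ∈ popBackWhile p l, x ∈ l := by
  induction l with
  | nil => intro x hx; simp [popBackWhile] at hx
  | cons z zs ih =>
    intro x hx
    unfold popBackWhile at hx
    cases h : popBackWhile p zs with
    | nil =>
      rw [h] at hx
      by_cases hp : p z = true
      · rw [if_pos hp] at hx; exact absurd hx (List.not_mem_nil)
      · rw [if_neg hp] at hx
        rcases List.mem_singleton.1 hx with h'
        exact h' ▸ List.mem_cons_self
    | cons y ys =>
      rw [h] at hx
      rcases List.mem_cons.1 hx with h' | h'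
      · exact h' ▸ List.mem_cons_self
      · exact List.mem_cons_of_mem z (ih x (h ▸ h'))

theorem dqL_mem_lt (a : Nat → Int) (r : Int) :
    ∀ i, ∀ j ∈ dqL a r i, j < i := by
  intro i
  induction i with
  | zero => intro j hj; simp [dqL] at hj
  | succ i ih =>
    intro j hj
    unfold dqL at hj
    rcases List.mem_append.1 hj with h | h
    · have h1 : j ∈ evL r i (dqL a r i) := popBackWhile_subset _ _ j h
      have h2 : j ∈ dqL a r i := (List.dropWhile_sublist _).subset h1
      exact Nat.lt_succ_of_lt (ih j h2)
    · rcases List.mem_singleton.1 h with h'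
      omega

theorem lmVal_neg (a : Nat → Int) (r : Int) (hneg : r < 0) (i : Nat) : lmVal a r i = none := by
  unfold lmVal evL
  rw [List.dropWhile_eq_nil_iff.2 ?_]
  · rfl
  · intro j hj
    have := dqL_mem_lt a r i j hj
    simp only [decide_eq_true_eq]
    omega

theorem dqRi_mem_gt (a : Nat → Int) (r : Int) (n : Nat) :
    ∀ (d i : Nat), i ≤ n → n - i ≤ d → ∀ j ∈ dqRi a r n i, i < j := by
  intro d
  induction d with
  | zero =>
    intro i hi hd j hj
    have hin : i = n := by omega
    rw [hin, dqRi_base] at hj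
    exact absurd hj (List.not_mem_nil)
  | succ d ihd =>
    intro i hi hd j hj
    by_cases hin : i = n
    · rw [hin, dqRi_base] at hj
      exact absurd hj (List.not_mem_nil)
    · unfold dqRi at hj
      rw [dif_neg (by omega)] at hj
      have hj2 := (List.dropWhile_sublist _).subset hj
      by_cases h1 : i + 1 < n
      · rw [if_pos h1] at hj2
        rcases List.mem_append.1 hj2 with h | h
        · have := ihd (i + 1) (by omega) (by omega) j (popBackWhile_subset _ _ j h)
          omega
        · rcases List.mem_singleton.1 h with h'
          omega
      · rw [if_neg h1] at hj2
        have := ihd (i + 1) (by omega) (by omega) j hj2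
        omega

theorem rmVal_neg (a : Nat → Int) (r : Int) (n : Nat) (hneg : r < 0) (i : Nat) (hi : i < n) :
    rmVal a r n i = none := by
  unfold rmVal
  conv_lhs => rw [dqRi]
  rw [dif_neg (by omega)]
  show ((evR r i _).head?).map a = none
  unfold evR
  rw [List.dropWhile_eq_nil_iff.2 ?_]
  · rfl
  · intro j hj
    simp only [decide_eq_true_eq]
    by_cases h1 : i + 1 < n
    · rw [if_pos h1] at hj
      rcases List.mem_append.1 hj with h | h
      · have := dqRi_mem_gt a r n (n - (i + 1)) (i + 1) (by omega) (le_refl _) j (popBackWhile_subset _ _ j h)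
        omega
      · rcases List.mem_singleton.1 h with h'
        omega
    · rw [if_neg h1] at hj
      have := dqRi_mem_gt a r n (n - (i + 1)) (i + 1) (by omega) (le_refl _) j hj
      omega

theorem map_getD_range_int (f : Nat → Int) (n i : Nat) (hi : i < n) :
    ((List.range n).map f).getD i 0 = f i := by
  rw [List.getD, List.getElem?_map, List.getElem?_range hi]
  rfl

theorem B_neg (arr : List Int) (r : Int) (hneg : r < 0) :
    local_minima_with_radius_alt arr r = arr := by
  rw [B_map]
  have hbody : ∀ i ∈ List.range arr.length,
      (if cB arr r i then arr.getD i 0 else 4) = arr.getD i 0 := by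
    intro i hi
    have hcb : cB arr r i = true := by
      unfold cB
      rw [lmVal_neg _ _ hneg, rmVal_neg _ _ _ hneg _ (List.mem_range.1 hi)]
      rfl
    rw [hcb, if_pos rfl]
  rw [List.map_congr_left hbody, map_getD_range]

-- slice bound arithmetic, via clampIdx
theorem clampIdx_of_nonneg (n : Nat) (t : Int) (ht : 0 ≤ t) :
    PySem.List.clampIdx n t = min t.toNat n := by
  simp only [PySem.List.clampIdx]
  rw [if_neg (by omega)]

theorem clampIdx_of_neg (n : Nat) (t : Int) (ht : t < 0) :
    PySem.List.clampIdx n t = ((n : Int) + t).toNat := by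
  simp only [PySem.List.clampIdx]
  rw [if_pos ht]
  split_ifs with h
  · omega
  · rfl

theorem slice_eq_clamp (arr : List Int) (a b : Int) :
    PySem.List.slice arr (some a) (some b)
      = List.take (PySem.List.clampIdx arr.length b - PySem.List.clampIdx arr.length a)
          (List.drop (PySem.List.clampIdx arr.length a) arr) := rfl

-- for r < 0 the left slice arr[max(0,i-r):i] starts past i: empty
theorem sliceL_empty (arr : List Int) (r : Int) (hneg : r < 0) (i : Nat) (hi : i < arr.length) :
    PySem.List.slice arr (some (max 0 ((i : Int) - r))) (some ((i : Nat) : Int)) = [] := by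
  rw [slice_eq_clamp]
  rw [clampIdx_of_nonneg _ _ (le_max_left 0 _), clampIdx_of_nonneg _ _ (by omega)]
  have h1 : min ((i : Nat) : Int).toNat arr.length = i := by omega
  have h2 : i ≤ min (max 0 ((i : Int) - r)).toNat arr.length := by omega
  rw [h1]
  rw [Nat.sub_eq_zero_of_le h2, List.take_zero]

-- for r < 0 with i+r+1 still nonnegative the right slice is empty too
theorem sliceR_empty (arr : List Int) (r : Int) (hneg : r < 0) (i : Nat) (hi : i < arr.length)
    (h1 : 0 ≤ (i : Int) + r + 1) :
    PySem.List.slice arr (some ((i : Int) + 1))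
      (some (min (arr.length : Int) ((i : Int) + r + 1))) = [] := by
  rw [slice_eq_clamp]
  rw [clampIdx_of_nonneg _ _ (by omega), clampIdx_of_nonneg _ _ (by omega)]
  have h2 : min (min (arr.length : Int) ((i : Int) + r + 1)).toNat arr.length
      ≤ min ((i : Int) + 1).toNat arr.length := by omega
  rw [Nat.sub_eq_zero_of_le h2, List.take_zero]

-- for i+r+1 < 0 Python wraps the slice end: arr[i+1 : len(arr)+i+r+1]
theorem sliceR_wrap (arr : List Int) (r : Int) (i : Nat) (hi : i < arr.length)
    (hwrap : (i : Int) + r + 1 < 0) :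
    PySem.List.slice arr (some ((i : Int) + 1))
        (some (min (arr.length : Int) ((i : Int) + r + 1)))
      = List.take (((arr.length : Int) + ((i : Int) + r + 1)).toNat - (i + 1))
          (List.drop (i + 1) arr) := by
  have hmin : min (arr.length : Int) ((i : Int) + r + 1) = (i : Int) + r + 1 := by omega
  rw [hmin, slice_eq_clamp]
  rw [clampIdx_of_neg _ _ hwrap, clampIdx_of_nonneg _ _ (by omega)]
  have h1 : min ((i : Int) + 1).toNat arr.length = i + 1 := by omega
  rw [h1]

theorem A_neg (arr : List Int) (r : Int) (hneg : r < 0)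
    (hD : ¬ D_local_minima_with_radius arr r) :
    local_minima_with_radius arr r = arr := by
  rw [A_map]
  have hbody : ∀ i ∈ List.range arr.length,
      (if cA arr r i then arr.getD i 0 else 4) = arr.getD i 0 := by
    intro i hi0
    have hi : i < arr.length := List.mem_range.1 hi0
    cases hcA : cA arr r i with
    | true => rw [if_pos rfl]
    | false =>
      rw [if_neg (by simp)]
      unfold cA at hcA
      rw [minCond_le, minCond_lt, sliceL_empty arr r hneg i hi] at hcA
      simp only [List.not_mem_nil, false_implies, implies_true, decide_true, Bool.true_and] at hcA
      by_cases h1 : 0 ≤ (i : Int) + r + 1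
      · rw [sliceR_empty arr r hneg i hi h1] at hcA
        simp at hcA
      · rw [sliceR_wrap arr r i hi (by omega)] at hcA
        simp only [decide_eq_false_iff_not] at hcA
        push Not at hcA
        obtain ⟨y, hymem, hyle⟩ := hcA
        have ht : ((arr.length : Int) + ((i : Int) + r + 1)).toNat ≤ arr.length := by omega
        rw [mem_drop_take arr (i + 1) _ ht] at hymem
        obtain ⟨j, hsj, hjt, rfl⟩ := hymem
        by_contra hne
        refine hD ⟨i, hi, by omega, fun h => hne h.symm, j, by omega, by omega, by omega, hyle⟩
  rw [List.map_congr_left hbody, map_getD_range]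

-- ===== VERDICT (by name: the statement is the Claim_ definition above) =====
theorem local_minima_with_radius_spec : Claim_unchanged_local_minima_with_radius := by
  unfold Claim_unchanged_local_minima_with_radius
  intro arr r _
  unfold Spec_local_minima_with_radius
  intro hD
  by_cases hr : 0 ≤ r
  · exact main_nonneg arr r hr
  · rw [A_neg arr r (by omega) hD, B_neg arr r (by omega)]

theorem local_minima_with_radius_changed : Claim_changed_local_minima_with_radius := by
  unfold Claim_changed_local_minima_with_radius; decide

theorem local_minima_with_radius_tight : Claim_exact_local_minima_with_radius := by
  unfold Claim_exact_local_minima_with_radius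
  intro arr r _ hD heq
  obtain ⟨i, hi, hwrap, h4, j, hjn, hij, hjlt, hle⟩ := hD
  have hneg : r < 0 := by omega
  have hAi : (local_minima_with_radius arr r).getD i 0 = 4 := by
    rw [A_map, map_getD_range_int _ _ _ hi]
    have hfalse : cA arr r i = false := by
      cases hcA : cA arr r i with
      | false => rfl
      | true =>
        exfalso
        unfold cA at hcA
        rw [minCond_lt, sliceR_wrap arr r i hi hwrap, Bool.and_eq_true] at hcA
        have hall := hcA.2
        simp only [decide_eq_true_eq] at hall
        have hjm : arr.getD j 0 ∈ List.take (((arr.length : Int) + ((i : Int) + r + 1)).toNat - (i + 1))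
            (List.drop (i + 1) arr) := by
          rw [mem_drop_take arr (i + 1) _ (by omega)]
          exact ⟨j, by omega, by omega, rfl⟩
        have := hall _ hjm
        omega
    rw [hfalse]
    rfl
  rw [heq, B_neg arr r hneg] at hAi
  exact h4 hAi
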